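-- pv_equiv track=rewrite | github.com/francesccapo/MasterThesis | csvprocessing.py | filterminworks
-- ===== SOURCE A (Python) =====
-- import operator
--
-- COMPOSER_COL = 1
--
-- FILE_COL = 0
--
-- def filterminworks(matrixinfo, minworks):
--     matrixinfo = sorted(matrixinfo, key=operator.itemgetter(COMPOSER_COL), reverse=False)
--     name_Temp = 'null'
--     number = 0
--     new_body = []
--     selection = []
--
--     for line in range(len(matrixinfo)):
--         if matrixinfo[line][COMPOSER_COL] != '':
--             if matrixinfo[line][COMPOSER_COL] == name_Temp:
--                 number += 1
--             else:
--                 if number != 0 and number >= minworks: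
--                     for rewrite in range(number):
--                         new_body.append(matrixinfo[line-1-rewrite])
--                     selection.append((name_Temp,number))
--                 name_Temp = matrixinfo[line][COMPOSER_COL]
--                 number = 1
--     if number != 0 and number >= minworks:
--         for rewrite in range(number):
--             new_body.append(matrixinfo[line-rewrite])
--         selection.append((name_Temp,number))
--
--
--     new_body = sorted(new_body, key=operator.itemgetter(FILE_COL), reverse=False)
--     new_body = sorted(new_body, key=operator.itemgetter(COMPOSER_COL), reverse=False)
--
--
--     selection = sorted(selection, key=operator.itemgetter(1), reverse=True)
--
--     return selection,new_body
-- ===== SOURCE B (Python) =====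
-- import operator
--
-- COMPOSER_COL = 1
--
-- FILE_COL = 0
--
-- def filterminworks(matrixinfo, minworks):
--     matrixinfo = sorted(matrixinfo, key=operator.itemgetter(COMPOSER_COL), reverse=False)
--     counts = {}
--     for row in matrixinfo:
--         name = row[COMPOSER_COL]
--         if name != '':
--             counts[name] = counts.get(name, 0) + 1
--     new_body = [row for row in matrixinfo
--                 if row[COMPOSER_COL] != '' and counts[row[COMPOSER_COL]] >= minworks]
--     new_body = sorted(new_body, key=operator.itemgetter(FILE_COL), reverse=False)
--     new_body = sorted(new_body, key=operator.itemgetter(COMPOSER_COL), reverse=False)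
--     selection = [(name, number) for name, number in counts.items() if number >= minworks]
--     selection = sorted(selection, key=operator.itemgetter(1), reverse=True)
--     return selection, new_body
-- ===== Notes on version B (the rewrite author's own statement) =====
-- stated objective: simpler
-- what changed: Replaces A's streaming group-flush state machine (name_Temp/number state, per-group index arithmetic matrixinfo[line-1-rewrite] and reversed re-appends) by a single dict of per-composer counts built in one pass over the composer-sorted rows, with new_body a plain filter of those rows and selection a filter of the dict's items.
import Mathlib
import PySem

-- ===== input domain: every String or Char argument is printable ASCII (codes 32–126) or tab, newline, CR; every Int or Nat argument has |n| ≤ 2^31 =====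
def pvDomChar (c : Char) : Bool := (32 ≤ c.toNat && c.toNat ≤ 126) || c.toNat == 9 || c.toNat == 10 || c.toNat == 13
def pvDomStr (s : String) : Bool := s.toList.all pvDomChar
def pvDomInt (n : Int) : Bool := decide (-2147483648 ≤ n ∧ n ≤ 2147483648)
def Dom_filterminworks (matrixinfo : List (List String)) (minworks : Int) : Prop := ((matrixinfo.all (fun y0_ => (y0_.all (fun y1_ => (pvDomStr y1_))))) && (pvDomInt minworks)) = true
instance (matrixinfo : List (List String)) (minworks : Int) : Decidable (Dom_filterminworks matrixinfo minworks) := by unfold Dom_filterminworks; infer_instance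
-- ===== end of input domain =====

-- B replaces A's index-arithmetic group-flush state machine by a dict of per-composer counts and
-- a single filter pass (objective: simpler). Pre_ excludes rows shorter than 2 entries (A raises)
-- and duplicate (file, composer) keyed rows, where new_body's internal order is an accidental tie-break.


-- ===== PORT A =====
-- operator.itemgetter(COMPOSER_COL) / itemgetter(FILE_COL); exact for rows of length ≥ 2 (Pre_;
-- Python raises IndexError on shorter rows).
def pvKeyC (r : List String) : String := r.getD 1 ""
def pvKeyF (r : List String) : String := r.getD 0 ""

-- the body of A's 'for line in range(len(matrixinfo))' loop, state (name_Temp, number, new_body, selection)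
def pvAstep (s : List (List String)) (minworks : Int)
    (st : String × Int × List (List String) × List (String × Int)) (line : Int) :
    String × Int × List (List String) × List (String × Int) :=
  match st with
  | (nameTemp, number, newBody, selection) =>
    if pvKeyC (PySem.List.pyGetD s line []) ≠ "" then
      if pvKeyC (PySem.List.pyGetD s line []) = nameTemp then
        (nameTemp, number + 1, newBody, selection)
      else
        if number ≠ 0 ∧ minworks ≤ number then
          (pvKeyC (PySem.List.pyGetD s line []), 1,
           (PySem.List.pyRange 0 number 1).foldl
             (fun acc rw => acc ++ [PySem.List.pyGetD s (line - 1 - rw) []]) newBody,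
           selection ++ [(nameTemp, number)])
        else (pvKeyC (PySem.List.pyGetD s line []), 1, newBody, selection)
    else st

def filterminworks (matrixinfo : List (List String)) (minworks : Int) :
    (List (String × Int)) × List (List String) :=
  let s := PySem.List.sorted matrixinfo pvKeyC false
  match (PySem.List.pyRange 0 (s.length : Int) 1).foldl (pvAstep s minworks) ("null", 0, [], []) with
  | (nameTemp, number, newBody, selection) =>
    let line : Int := (s.length : Int) - 1
    let newBody := if number ≠ 0 ∧ minworks ≤ number then
        (PySem.List.pyRange 0 number 1).foldl
          (fun acc rw => acc ++ [PySem.List.pyGetD s (line - rw) []]) newBody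
      else newBody
    let selection := if number ≠ 0 ∧ minworks ≤ number then selection ++ [(nameTemp, number)]
      else selection
    let newBody := PySem.List.sorted newBody pvKeyF false
    let newBody := PySem.List.sorted newBody pvKeyC false
    (PySem.List.sorted selection (fun p => p.2) true, newBody)

-- ===== PORT B =====
def filterminworks_alt (matrixinfo : List (List String)) (minworks : Int) :
    (List (String × Int)) × List (List String) :=
  let s := PySem.List.sorted matrixinfo pvKeyC false
  let counts := s.foldl
    (fun d r => if pvKeyC r ≠ "" then d.insert (pvKeyC r) (d.getD (pvKeyC r) 0 + 1) else d)
    (PySem.Dict.empty : PySem.Dict String Int)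
  let newBody := s.filter (fun r => decide (pvKeyC r ≠ "" ∧ minworks ≤ counts.getD (pvKeyC r) 0))
  let newBody := PySem.List.sorted newBody pvKeyF false
  let newBody := PySem.List.sorted newBody pvKeyC false
  let selection := counts.items.filter (fun p => decide (minworks ≤ p.2))
  (PySem.List.sorted selection (fun p => p.2) true, newBody)

-- ===== PRECONDITION & SPEC =====
-- Pre_ excludes rows with fewer than 2 entries (Python's itemgetter raises IndexError there) and
-- matrices containing two unequal rows that share both file and (nonempty) composer, on which the
-- relative order of those rows inside new_body is an accidental tie-break of A's per-group reversal.
def Pre_filterminworks (matrixinfo : List (List String)) (minworks : Int) : Prop :=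
  (∀ r ∈ matrixinfo, 2 ≤ r.length) ∧
  matrixinfo.Pairwise (fun r r' =>
    ¬(r.getD 1 "" ≠ "" ∧ r'.getD 1 "" ≠ "" ∧ r.getD 0 "" = r'.getD 0 "" ∧
      r.getD 1 "" = r'.getD 1 "" ∧ r ≠ r'))
instance (matrixinfo : List (List String)) (minworks : Int) :
    Decidable (Pre_filterminworks matrixinfo minworks) := by
  unfold Pre_filterminworks; infer_instance

def pvWitness_filterminworks : List (List String) × Int := ([["f1", "c"], ["f2", "c"]], 1)

def Spec_filterminworks (matrixinfo : List (List String)) (minworks : Int)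
    (out : (List (String × Int)) × List (List String)) : Prop :=
  out = filterminworks_alt matrixinfo minworks
instance (matrixinfo : List (List String)) (minworks : Int)
    (out : (List (String × Int)) × List (List String)) :
    Decidable (Spec_filterminworks matrixinfo minworks out) := by
  unfold Spec_filterminworks; infer_instance

-- ===== CLAIM (what is proved, stated in full; the proofs are below) =====
def Claim_equal_filterminworks : Prop := ∀ (matrixinfo : List (List String)) (minworks : Int), Dom_filterminworks matrixinfo minworks → Pre_filterminworks matrixinfo minworks → Spec_filterminworks matrixinfo minworks (filterminworks matrixinfo minworks)

-- ===== LEMMAS AND PROOFS =====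

-- the state machine A's loop implements, phrased on the current group 'cur' instead of indices
def pvStepS (n : Int) (st : List (List String) × List (List String) × List (String × Int))
    (r : List String) : List (List String) × List (List String) × List (String × Int) :=
  if st.1 ≠ [] ∧ pvKeyC r = pvKeyC (st.1.headD []) then (st.1 ++ [r], st.2.1, st.2.2)
  else if st.1 ≠ [] ∧ n ≤ (st.1.length : Int) then
    ([r], st.2.1 ++ st.1.reverse, st.2.2 ++ [(pvKeyC (st.1.headD []), (st.1.length : Int))])
  else ([r], st.2.1, st.2.2)

def pvFlush (n : Int) (st : List (List String) × List (List String) × List (String × Int)) :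
    List (List String) × List (String × Int) :=
  if st.1 ≠ [] ∧ n ≤ (st.1.length : Int) then
    (st.2.1 ++ st.1.reverse, st.2.2 ++ [(pvKeyC (st.1.headD []), (st.1.length : Int))])
  else (st.2.1, st.2.2)

-- maximal adjacent runs of equal composer key
def pvRuns : List (List String) → List (List (List String))
  | [] => []
  | r :: rs =>
    (r :: rs.takeWhile (fun x => pvKeyC x == pvKeyC r)) ::
      pvRuns (rs.dropWhile (fun x => pvKeyC x == pvKeyC r))
  termination_by t => t.length
  decreasing_by
    simp only [List.length_cons]
    exact Nat.lt_succ_of_le (List.length_dropWhile_le _ _)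

def pvGq (n : Int) (t : List (List String)) : List (List (List String)) :=
  (pvRuns t).filter (fun g => decide (n ≤ (g.length : Int)))

def pvNm (cur : List (List String)) : String := if cur = [] then "null" else pvKeyC (cur.headD [])

lemma pvStr_empty_le (s : String) : "" ≤ s := by
  rw [String.le_iff_toList_le]
  have h : ("" : String).toList = [] := by decide
  rw [h]
  cases hl : s.toList with
  | nil => exact le_refl _
  | cons c cs => exact le_of_lt (List.nil_lt_cons c cs)

lemma pvHeadD_append (cur l : List (List String)) (d : List String) (h : cur ≠ []) :
    (cur ++ l).headD d = cur.headD d := by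
  cases cur with
  | nil => exact absurd rfl h
  | cons x xs => simp

lemma pvRuns_decomp (t : List (List String))
    (hp : t.Pairwise (fun a b => pvKeyC a ≤ pvKeyC b)) (hne : t ≠ []) :
    ∃ g rest, t = g ++ rest ∧ g ≠ [] ∧
      (∀ x ∈ g, pvKeyC x = pvKeyC (g.headD [])) ∧
      (∀ x ∈ rest, pvKeyC (g.headD []) < pvKeyC x) ∧
      pvRuns t = g :: pvRuns rest ∧
      rest.Pairwise (fun a b => pvKeyC a ≤ pvKeyC b) ∧
      rest.length < t.length := by
  cases t with
  | nil => exact absurd rfl hne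
  | cons r rs =>
    refine ⟨r :: rs.takeWhile (fun x => pvKeyC x == pvKeyC r),
            rs.dropWhile (fun x => pvKeyC x == pvKeyC r), ?_, by simp, ?_, ?_, ?_, ?_, ?_⟩
    · simp [List.takeWhile_append_dropWhile]
    · intro x hx
      rcases List.mem_cons.mp hx with rfl | hx
      · simp
      · simpa using beq_iff_eq.mp (List.mem_takeWhile_imp (p := fun x => pvKeyC x == pvKeyC r) hx)
    · -- every element of the dropped rest has a strictly larger key
      have hle : ∀ x ∈ rs, pvKeyC r ≤ pvKeyC x := (List.pairwise_cons.mp hp).1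
      have hpw_rs : rs.Pairwise (fun a b => pvKeyC a ≤ pvKeyC b) := (List.pairwise_cons.mp hp).2
      have hpw_rest : (rs.dropWhile (fun x => pvKeyC x == pvKeyC r)).Pairwise
          (fun a b => pvKeyC a ≤ pvKeyC b) :=
        List.Pairwise.sublist (List.dropWhile_sublist _) hpw_rs
      intro x hx
      simp only [List.headD_cons]
      cases hdw : rs.dropWhile (fun x => pvKeyC x == pvKeyC r) with
      | nil => rw [hdw] at hx; exact absurd hx (List.not_mem_nil)
      | cons y ys =>
        have hy : pvKeyC y ≠ pvKeyC r := by
          have hh : ((rs.dropWhile (fun x => pvKeyC x == pvKeyC r)).head (by simp [hdw])) = y := by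
            simp [hdw]
          have := List.head_dropWhile_not (fun x => pvKeyC x == pvKeyC r) (l := rs) (by simp [hdw])
          rw [hh] at this
          simpa using this
        have hylt : pvKeyC r < pvKeyC y :=
          lt_of_le_of_ne (hle y ((List.dropWhile_sublist _).subset (by rw [hdw]; simp))) (Ne.symm hy)
        rw [hdw] at hx
        rcases List.mem_cons.mp hx with rfl | hx
        · exact hylt
        · have : pvKeyC y ≤ pvKeyC x := by
            rw [hdw] at hpw_rest
            exact (List.pairwise_cons.mp hpw_rest).1 x hx
          exact lt_of_lt_of_le hylt this
    · rw [pvRuns]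
    · exact List.Pairwise.sublist (List.dropWhile_sublist _) (List.pairwise_cons.mp hp).2
    · simp only [List.length_cons]
      exact Nat.lt_succ_of_le (List.length_dropWhile_le _ _)

lemma pvRuns_flatten (t : List (List String)) : (pvRuns t).flatten = t := by
  induction t using pvRuns.induct with
  | case1 => simp [pvRuns]
  | case2 r rs ih =>
    rw [pvRuns]
    simp only [List.flatten_cons, ih, List.cons_append]
    rw [List.takeWhile_append_dropWhile]

lemma pvFold_run (n : Int) (run : List (List String)) (cur body : List (List String))
    (sel : List (String × Int)) (hcur : cur ≠ [])
    (hk : ∀ x ∈ run, pvKeyC x = pvKeyC (cur.headD [])) :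
    run.foldl (pvStepS n) (cur, body, sel) = (cur ++ run, body, sel) := by
  induction run generalizing cur with
  | nil => simp
  | cons x xs ih =>
    rw [List.foldl_cons]
    have hstep : pvStepS n (cur, body, sel) x = (cur ++ [x], body, sel) := by
      unfold pvStepS
      simp only [if_pos (⟨hcur, hk x (by simp)⟩ :
        (cur, body, sel).1 ≠ [] ∧ pvKeyC x = pvKeyC ((cur, body, sel).1.headD []))]
    rw [hstep, ih (cur ++ [x]) (by simp [hcur]) ?_]
    · simp
    · intro y hy
      rw [pvHeadD_append cur [x] [] hcur]
      exact hk y (by simp [hy])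

lemma pvSpec_runs (n : Int) (t : List (List String)) (body : List (List String))
    (sel : List (String × Int)) (hp : t.Pairwise (fun a b => pvKeyC a ≤ pvKeyC b)) :
    pvFlush n (t.foldl (pvStepS n) ([], body, sel)) =
      (body ++ ((pvGq n t).map List.reverse).flatten,
       sel ++ (pvGq n t).map (fun g => (pvKeyC (g.headD []), (g.length : Int)))) := by
  induction hN : t.length using Nat.strong_induction_on generalizing t body sel with
  | _ N ih =>
  rcases eq_or_ne t [] with rfl | hne
  · simp [pvFlush, pvGq, pvRuns]
  obtain ⟨g, rest, htgr, hgne, hgk, hgt, hruns, hrpw, hlt⟩ := pvRuns_decomp t hp hne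
  obtain ⟨r, g', rfl⟩ : ∃ r g', g = r :: g' := by
    cases g with
    | nil => exact absurd rfl hgne
    | cons a b => exact ⟨a, b, rfl⟩
  have hfold_g : (r :: g').foldl (pvStepS n) ([], body, sel) = (r :: g', body, sel) := by
    rw [List.foldl_cons]
    have h1 : pvStepS n ([], body, sel) r = ([r], body, sel) := by unfold pvStepS; simp
    rw [h1]
    have hkeys : ∀ y ∈ g', pvKeyC y = pvKeyC (([r] : List (List String)).headD []) := by
      intro y hy
      simpa using hgk y (by simp [hy])
    simpa using pvFold_run n g' [r] body sel (by simp) hkeys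
  subst htgr
  rw [List.foldl_append, hfold_g]
  have hkey_ne : ∀ x ∈ rest, pvKeyC x ≠ pvKeyC ((r :: g').headD []) :=
    fun x hx => ne_of_gt (hgt x hx)
  cases rest with
  | nil =>
    simp only [List.foldl_nil]
    by_cases hq : n ≤ (((r :: g').length : Nat) : Int)
    · unfold pvGq
      rw [hruns]
      have hq' : n ≤ (g'.length : Int) + 1 := by simpa using hq
      simp [pvRuns, pvFlush, List.filter_cons, hq, hq']
    · unfold pvGq
      rw [hruns]
      have hq' : ¬ n ≤ (g'.length : Int) + 1 := by simpa using hq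
      simp [pvRuns, pvFlush, List.filter_cons, hq, hq']
  | cons r' rest' =>
    have hne' : pvKeyC r' ≠ pvKeyC ((r :: g').headD []) := hkey_ne r' (by simp)
    have hlen' : (r' :: rest').length < N := hN ▸ hlt
    rw [List.foldl_cons]
    have hre : ∀ b2 s2, rest'.foldl (pvStepS n) ([r'], b2, s2) =
        (r' :: rest').foldl (pvStepS n) ([], b2, s2) := by
      intro b2 s2
      rw [List.foldl_cons]
      have : pvStepS n ([], b2, s2) r' = ([r'], b2, s2) := by unfold pvStepS; simp
      rw [this]
    by_cases hq : n ≤ (((r :: g').length : Nat) : Int)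
    · have hstep : pvStepS n (r :: g', body, sel) r' =
          ([r'], body ++ (r :: g').reverse,
           sel ++ [(pvKeyC ((r :: g').headD []), ((r :: g').length : Int))]) := by
        unfold pvStepS
        rw [if_neg (by simpa using hne'), if_pos (by simpa using hq)]
      rw [hstep, hre, ih _ hlen' _ _ _ hrpw rfl]
      unfold pvGq
      rw [hruns]
      have hq' : n ≤ (g'.length : Int) + 1 := by simpa using hq
      simp [List.filter_cons, hq', List.append_assoc]
    · have hstep : pvStepS n (r :: g', body, sel) r' = ([r'], body, sel) := by
        unfold pvStepS
        rw [if_neg (by simpa using hne'), if_neg (by simpa using hq)]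
      rw [hstep, hre, ih _ hlen' _ _ _ hrpw rfl]
      unfold pvGq
      rw [hruns]
      have hq' : ¬ n ≤ (g'.length : Int) + 1 := by simpa using hq
      simp [List.filter_cons, hq']

lemma pvFoldl_add_cons (L2 : List String) (c : String) (acc : List String) (hc : c ∉ L2) :
    L2.foldl PySem.Set.add (c :: acc) = c :: L2.foldl PySem.Set.add acc := by
  induction L2 generalizing acc with
  | nil => simp
  | cons x xs ih =>
    have hxc : x ≠ c := fun h => hc (by simp [h])
    have hxs : c ∉ xs := fun h => hc (by simp [h])
    simp only [List.foldl_cons]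
    have hadd : PySem.Set.add (c :: acc) x = c :: PySem.Set.add acc x := by
      simp only [PySem.Set.add, PySem.Set.contains, List.contains_cons]
      have hbeq : (x == c) = false := by simpa using hxc
      rw [hbeq]
      simp only [Bool.false_or]
      by_cases hmem : x ∈ acc <;> simp [hmem]
    rw [hadd, ih _ hxs]

lemma pvOfList_run (L1 L2 : List String) (c : String) (hL1 : ∀ x ∈ L1, x = c) (hne : L1 ≠ [])
    (hc : c ∉ L2) : PySem.Set.ofList (L1 ++ L2) = c :: PySem.Set.ofList L2 := by
  have hfold : L1.foldl PySem.Set.add PySem.Set.empty = [c] := by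
    cases L1 with
    | nil => exact absurd rfl hne
    | cons x xs =>
      have hx : x = c := hL1 x (by simp)
      subst hx
      simp only [List.foldl_cons]
      have hstart : PySem.Set.add PySem.Set.empty x = [x] := by
        simp [PySem.Set.add, PySem.Set.empty]
      rw [hstart]
      have : ∀ (l : List String), (∀ y ∈ l, y = x) → l.foldl PySem.Set.add [x] = [x] := by
        intro l
        induction l with
        | nil => simp
        | cons z zs ihz =>
          intro hz
          have : z = x := hz z (by simp)
          subst this
          simp only [List.foldl_cons]
          have : PySem.Set.add [z] z = [z] := by simp [PySem.Set.add]
          rw [this]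
          exact ihz (fun y hy => hz y (by simp [hy]))
      exact this xs (fun y hy => hL1 y (by simp [hy]))
  simp only [PySem.Set.ofList, List.foldl_append, hfold]
  exact pvFoldl_add_cons L2 c [] hc

lemma pvOfMap_runs (t : List (List String))
    (hp : t.Pairwise (fun a b => pvKeyC a ≤ pvKeyC b)) :
    (PySem.Set.ofList (t.map pvKeyC)).map (fun k => (k, ((t.map pvKeyC).count k : Int))) =
      (pvRuns t).map (fun g => (pvKeyC (g.headD []), (g.length : Int))) := by
  induction hN : t.length using Nat.strong_induction_on generalizing t with
  | _ N ih =>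
  rcases eq_or_ne t [] with rfl | hne
  · simp [pvRuns, PySem.Set.ofList, PySem.Set.empty]
  obtain ⟨g, rest, htgr, hgne, hgk, hgt, hruns, hrpw, hlt⟩ := pvRuns_decomp t hp hne
  subst htgr
  rw [hruns]
  have hmapg : ∀ x ∈ g.map pvKeyC, x = pvKeyC (g.headD []) := by
    intro x hx
    obtain ⟨y, hy, rfl⟩ := List.mem_map.mp hx
    exact hgk y hy
  have hcK2 : pvKeyC (g.headD []) ∉ rest.map pvKeyC := by
    intro hmem
    obtain ⟨y, hy, hyy⟩ := List.mem_map.mp hmem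
    exact absurd hyy (ne_of_gt (hgt y hy))
  rw [List.map_append,
      pvOfList_run (g.map pvKeyC) (rest.map pvKeyC) (pvKeyC (g.headD [])) hmapg
        (by simpa using hgne) hcK2,
      List.map_cons, List.map_cons]
  congr 1
  · have h1 : (g.map pvKeyC).count (pvKeyC (g.headD [])) = (g.map pvKeyC).length :=
      List.count_eq_length.mpr (fun b hb => (hmapg b hb).symm)
    have h2 : (rest.map pvKeyC).count (pvKeyC (g.headD [])) = 0 :=
      List.count_eq_zero.mpr hcK2
    simp only [List.headD_eq_head?_getD] at h1 h2
    simp [List.count_append, h1, h2]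
  · have hcong : (PySem.Set.ofList (rest.map pvKeyC)).map
        (fun k => (k, (((g.map pvKeyC ++ rest.map pvKeyC).count k : Nat) : Int))) =
        (PySem.Set.ofList (rest.map pvKeyC)).map
        (fun k => (k, (((rest.map pvKeyC).count k : Nat) : Int))) := by
      apply List.map_congr_left
      intro k hk
      have hkmem : k ∈ rest.map pvKeyC := (PySem.Set.mem_ofList _ _).mp hk
      obtain ⟨y, hy, rfl⟩ := List.mem_map.mp hkmem
      have hkg : pvKeyC y ∉ g.map pvKeyC := by
        intro hmem
        exact absurd (hmapg _ hmem) (ne_of_gt (hgt y hy))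
      simp [List.count_append, List.count_eq_zero.mpr hkg]
    rw [hcong, ih rest.length (hN ▸ hlt) rest hrpw rfl]

lemma pvItems_runs (t : List (List String))
    (hp : t.Pairwise (fun a b => pvKeyC a ≤ pvKeyC b)) :
    (PySem.Dict.counter (t.map pvKeyC)).items =
      (pvRuns t).map (fun g => (pvKeyC (g.headD []), (g.length : Int))) := by
  rw [PySem.Dict.items_counter]
  exact pvOfMap_runs t hp

lemma pvCounts_eq (s : List (List String)) :
    s.foldl (fun d r => if pvKeyC r ≠ "" then d.insert (pvKeyC r) (d.getD (pvKeyC r) 0 + 1) else d)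
      (PySem.Dict.empty : PySem.Dict String Int) =
    PySem.Dict.counter ((s.filter (fun r => decide (pvKeyC r ≠ ""))).map pvKeyC) := by
  have h1 : s.foldl
      (fun d r => if pvKeyC r ≠ "" then d.insert (pvKeyC r) (d.getD (pvKeyC r) 0 + 1) else d)
      (PySem.Dict.empty : PySem.Dict String Int) =
      (s.filter (fun r => decide (pvKeyC r ≠ ""))).foldl
        (fun d r => d.insert (pvKeyC r) (d.getD (pvKeyC r) 0 + 1)) PySem.Dict.empty :=
    PySem.List.foldl_ite_eq_foldl_filter _ _ _ _
  rw [h1, ← PySem.Dict.foldl_insert_getD_add_one_eq_counter, List.foldl_map]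

lemma pvFilterBody_runs (n : Int) (t : List (List String))
    (hp : t.Pairwise (fun a b => pvKeyC a ≤ pvKeyC b)) :
    t.filter (fun r => decide (n ≤ (((t.map pvKeyC).count (pvKeyC r) : Nat) : Int))) =
      (pvGq n t).flatten := by
  induction hN : t.length using Nat.strong_induction_on generalizing t with
  | _ N ih =>
  rcases eq_or_ne t [] with rfl | hne
  · simp [pvGq, pvRuns]
  obtain ⟨g, rest, htgr, hgne, hgk, hgt, hruns, hrpw, hlt⟩ := pvRuns_decomp t hp hne
  subst htgr
  unfold pvGq
  rw [hruns, List.filter_append]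
  have hcg : ∀ x ∈ g, ((g.map pvKeyC ++ rest.map pvKeyC).count (pvKeyC x) : Nat) = g.length := by
    intro x hx
    have hxc : pvKeyC x = pvKeyC (g.headD []) := hgk x hx
    have h1 : (g.map pvKeyC).count (pvKeyC x) = (g.map pvKeyC).length :=
      List.count_eq_length.mpr (fun b hb => by
        obtain ⟨y, hy, rfl⟩ := List.mem_map.mp hb
        rw [hxc, hgk y hy])
    have h2 : (rest.map pvKeyC).count (pvKeyC x) = 0 :=
      List.count_eq_zero.mpr (by
        intro hmem
        obtain ⟨y, hy, hyy⟩ := List.mem_map.mp hmem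
        rw [hxc] at hyy
        exact absurd hyy (ne_of_gt (hgt y hy)))
    simp [List.count_append, h1, h2]
  have hfg : g.filter
      (fun r => decide (n ≤ ((((g ++ rest).map pvKeyC).count (pvKeyC r) : Nat) : Int))) =
      if n ≤ (g.length : Int) then g else [] := by
    by_cases hq : n ≤ (g.length : Int)
    · rw [if_pos hq]
      apply List.filter_eq_self.mpr
      intro x hx
      rw [List.map_append]
      simpa [hcg x hx] using hq
    · rw [if_neg hq]
      apply List.filter_eq_nil_iff.mpr
      intro x hx
      rw [List.map_append]
      simpa [hcg x hx] using hq
  have hfr : rest.filter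
      (fun r => decide (n ≤ ((((g ++ rest).map pvKeyC).count (pvKeyC r) : Nat) : Int))) =
      rest.filter (fun r => decide (n ≤ (((rest.map pvKeyC).count (pvKeyC r) : Nat) : Int))) := by
    apply List.filter_congr
    intro x hx
    have hxg : pvKeyC x ∉ g.map pvKeyC := by
      intro hmem
      obtain ⟨y, hy, hyy⟩ := List.mem_map.mp hmem
      exact absurd ((hgk y hy).symm.trans hyy) (ne_of_lt (hgt x hx))
    rw [List.map_append]
    simp [List.count_append, List.count_eq_zero.mpr hxg]
  rw [hfg, hfr, ih rest.length (hN ▸ hlt) rest hrpw rfl]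
  by_cases hq : n ≤ (g.length : Int)
  · simp [List.filter_cons, hq, pvGq]
  · simp [List.filter_cons, hq, pvGq]

lemma pvReadBack (q cur rest : List (List String)) (B : List (List String)) :
    (PySem.List.pyRange 0 ((cur.length : Nat) : Int) 1).foldl
      (fun acc rw => acc ++
        [PySem.List.pyGetD (q ++ (cur ++ rest)) ((((q.length + cur.length : Nat)) : Int) - 1 - rw) []]) B
      = B ++ cur.reverse := by
  rw [PySem.List.foldl_append_singleton_eq_map]
  congr 1
  rw [PySem.List.pyRange_zero_natCast, List.map_map]
  apply List.ext_getElem (by simp)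
  intro i h1 h2
  simp only [List.getElem_map, Function.comp_apply, List.getElem_range]
  have hi : i < cur.length := by simpa using h2
  have hidx : (((q.length + cur.length : Nat) : Int)) - 1 - ((i : Nat) : Int) =
      (((q.length + (cur.length - 1 - i) : Nat)) : Int) := by
    push_cast
    omega
  rw [hidx, PySem.List.pyGetD_natCast, List.getD_eq_getElem?_getD,
      List.getElem?_append_right (by omega)]
  have hsub : q.length + (cur.length - 1 - i) - q.length = cur.length - 1 - i := by omega
  rw [hsub, List.getElem?_append_left (by omega),
      List.getElem?_eq_getElem (by omega : cur.length - 1 - i < cur.length)]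
  simp [List.getElem_reverse]

lemma pvAloop (s : List (List String)) (n : Int)
    (hp : s.Pairwise (fun a b => pvKeyC a ≤ pvKeyC b)) (k : Nat) (hk : k ≤ s.length) :
    (PySem.List.pyRange 0 ((k : Nat) : Int) 1).foldl (pvAstep s n) ("null", 0, [], []) =
      (pvNm (((s.take k).filter (fun r => decide (pvKeyC r ≠ ""))).foldl (pvStepS n) ([], [], [])).1,
       ((((s.take k).filter (fun r => decide (pvKeyC r ≠ ""))).foldl (pvStepS n) ([], [], [])).1.length : Int),
       (((s.take k).filter (fun r => decide (pvKeyC r ≠ ""))).foldl (pvStepS n) ([], [], [])).2.1,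
       (((s.take k).filter (fun r => decide (pvKeyC r ≠ ""))).foldl (pvStepS n) ([], [], [])).2.2) ∧
    ∃ q, s.take k = q ++ (((s.take k).filter (fun r => decide (pvKeyC r ≠ ""))).foldl (pvStepS n) ([], [], [])).1 := by
  induction k with
  | zero =>
    refine ⟨by simp [pvNm], ⟨[], by simp⟩⟩
  | succ k ihk =>
    have hklt : k < s.length := Nat.lt_of_succ_le hk
    obtain ⟨hA, q, hq⟩ := ihk (le_of_lt hklt)
    have hrange : PySem.List.pyRange 0 (((k+1 : Nat)) : Int) 1 =
        PySem.List.pyRange 0 ((k : Nat) : Int) 1 ++ [((k : Nat) : Int)] := by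
      push_cast
      exact PySem.List.pyRange_one_succ_right (by omega)
    rw [hrange, List.foldl_append, hA, List.foldl_cons, List.foldl_nil]
    have hget : PySem.List.pyGetD s ((k : Nat) : Int) [] = s[k] := by
      rw [PySem.List.pyGetD_natCast, List.getD_eq_getElem?_getD,
          List.getElem?_eq_getElem hklt]
      rfl
    have htake : s.take (k+1) = s.take k ++ [s[k]] := by
      rw [List.take_add_one, List.getElem?_eq_getElem hklt]
      rfl
    by_cases hc : pvKeyC s[k] = ""
    · -- a row with empty composer: by sortedness nothing has been accumulated yet
      have hall : ∀ x ∈ s.take k, pvKeyC x = "" := by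
        intro x hx
        obtain ⟨i, hi, hxe⟩ := List.mem_iff_getElem.mp hx
        have hik : i < k := by
          have := hi
          simp only [List.length_take] at this
          omega
        have his : i < s.length := by omega
        have hxs : x = s[i] := by
          rw [← hxe]
          exact List.getElem_take
        have hR := List.pairwise_iff_getElem.mp hp i k his hklt hik
        rw [hxs]
        exact le_antisymm (hc ▸ hR) (pvStr_empty_le _)
      have hTk : (s.take k).filter (fun r => decide (pvKeyC r ≠ "")) = [] := by
        apply List.filter_eq_nil_iff.mpr
        intro x hx
        simp [hall x hx]
      have hTk1 : (s.take (k+1)).filter (fun r => decide (pvKeyC r ≠ "")) = [] := by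
        rw [htake, List.filter_append, hTk]
        simp [hc]
      rw [hTk1]
      rw [hTk]
      constructor
      · unfold pvAstep
        rw [hget]
        simp [hc, pvNm]
      · exact ⟨s.take (k+1), by simp⟩
    · have hfilters : (s.take (k+1)).filter (fun r => decide (pvKeyC r ≠ "")) =
          (s.take k).filter (fun r => decide (pvKeyC r ≠ "")) ++ [s[k]] := by
        rw [htake, List.filter_append]
        simp [hc]
      rw [hfilters, List.foldl_append, List.foldl_cons, List.foldl_nil]
      rcases hsp : ((s.take k).filter (fun r => decide (pvKeyC r ≠ ""))).foldl (pvStepS n) ([], [], [])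
        with ⟨cur, bo, se⟩
      rw [hsp] at hq
      rcases eq_or_ne cur [] with rfl | hcur
      · -- empty current group: A's state is the initial one
        have hstep : pvStepS n (([] : List (List String)), bo, se) s[k] = ([s[k]], bo, se) := by
          unfold pvStepS
          simp
        rw [hstep]
        constructor
        · unfold pvAstep
          rw [hget]
          by_cases hr : pvKeyC s[k] = "null"
          · simp [pvNm, hr]
          · simp [pvNm, hc, hr]
        · exact ⟨q, by rw [htake, hq]; simp⟩
      · obtain ⟨c0, cur', rfl⟩ : ∃ c0 cur', cur = c0 :: cur' := by
          cases cur with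
          | nil => exact absurd rfl hcur
          | cons a b => exact ⟨a, b, rfl⟩
        by_cases heq : pvKeyC s[k] = pvKeyC c0
        · have hstep : pvStepS n (c0 :: cur', bo, se) s[k] = ((c0 :: cur') ++ [s[k]], bo, se) := by
            unfold pvStepS
            rw [if_pos ⟨by simp, by simpa using heq⟩]
          rw [hstep]
          have hc0 : pvKeyC c0 ≠ "" := heq ▸ hc
          constructor
          · unfold pvAstep
            rw [hget]
            simp [pvNm, heq, hc0]
          · exact ⟨q, by rw [htake, hq]; simp⟩
        · -- a new composer starts here
          have hs : s = q ++ ((c0 :: cur') ++ s.drop k) := by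
            conv_lhs => rw [← List.take_append_drop k s, hq]
            simp
          have hklen : q.length + (c0 :: cur').length = k := by
            have := congrArg List.length hq
            simpa [List.length_take, Nat.min_eq_left (le_of_lt hklt)] using this.symm
          have hkcast : ((k : Nat) : Int) = ((((q.length + (c0 :: cur').length : Nat)) : Int)) := by
            rw [hklen]
          by_cases hq2 : n ≤ (((c0 :: cur').length : Nat) : Int)
          · have hstep : pvStepS n (c0 :: cur', bo, se) s[k] =
                ([s[k]], bo ++ (c0 :: cur').reverse,
                 se ++ [(pvKeyC c0, (((c0 :: cur').length : Nat) : Int))]) := by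
              unfold pvStepS
              rw [if_neg (by simpa using heq), if_pos ⟨by simp, hq2⟩]
              simp
            rw [hstep]
            have hread := pvReadBack q (c0 :: cur') (s.drop k) bo
            rw [← hs, ← hkcast] at hread
            constructor
            · unfold pvAstep
              rw [hget]
              simp only []
              rw [show pvNm (c0 :: cur') = pvKeyC c0 from by simp [pvNm]]
              rw [if_pos (by simpa using hc), if_neg heq,
                  if_pos ⟨by simp only [List.length_cons]; push_cast; omega, hq2⟩]
              rw [hread]
              simp [pvNm]
            · exact ⟨q ++ (c0 :: cur'), by rw [htake, hq, List.append_assoc]⟩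
          · have hstep : pvStepS n (c0 :: cur', bo, se) s[k] = ([s[k]], bo, se) := by
              unfold pvStepS
              rw [if_neg (by simpa using heq), if_neg (fun h => hq2 h.2)]
            rw [hstep]
            constructor
            · unfold pvAstep
              rw [hget]
              simp only []
              rw [show pvNm (c0 :: cur') = pvKeyC c0 from by simp [pvNm]]
              rw [if_pos (by simpa using hc), if_neg heq,
                  if_neg (fun h => hq2 h.2)]
              simp [pvNm]
            · exact ⟨q ++ (c0 :: cur'), by rw [htake, hq, List.append_assoc]⟩

lemma pvInsertBy_nil (B : List String → List String → Bool) (x : List String) :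
    PySem.List.insertBy B x [] = [x] := rfl

lemma pvInsertBy_cons (B : List String → List String → Bool) (x y : List String)
    (ys : List (List String)) :
    PySem.List.insertBy B x (y :: ys) =
      if B x y then x :: y :: ys else y :: PySem.List.insertBy B x ys := rfl

-- stability of the final composer sort over the file-sorted list
lemma pvInsertBy_pairwise (x : List String) (acc : List (List String))
    (h1 : acc.Pairwise (fun a b => pvKeyC a ≤ pvKeyC b))
    (hQ : acc.Pairwise (fun a b => pvKeyC a < pvKeyC b ∨ (pvKeyC a = pvKeyC b ∧ pvKeyF a ≤ pvKeyF b)))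
    (hx : ∀ a ∈ acc, pvKeyF a ≤ pvKeyF x) :
    (PySem.List.insertBy (fun a b => decide (pvKeyC a < pvKeyC b)) x acc).Pairwise
        (fun a b => pvKeyC a ≤ pvKeyC b) ∧
    (PySem.List.insertBy (fun a b => decide (pvKeyC a < pvKeyC b)) x acc).Pairwise
        (fun a b => pvKeyC a < pvKeyC b ∨ (pvKeyC a = pvKeyC b ∧ pvKeyF a ≤ pvKeyF b)) := by
  induction acc with
  | nil =>
    rw [pvInsertBy_nil]
    exact ⟨by simp, by simp⟩
  | cons y ys ih =>
    rw [pvInsertBy_cons]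
    by_cases hb : pvKeyC x < pvKeyC y
    · rw [if_pos (by simpa using hb)]
      constructor
      · refine List.pairwise_cons.mpr ⟨?_, h1⟩
        intro b hb2
        rcases List.mem_cons.mp hb2 with rfl | hb3
        · exact le_of_lt hb
        · exact le_of_lt (lt_of_lt_of_le hb (List.rel_of_pairwise_cons h1 hb3))
      · refine List.pairwise_cons.mpr ⟨?_, hQ⟩
        intro b hb2
        left
        rcases List.mem_cons.mp hb2 with rfl | hb3
        · exact hb
        · exact lt_of_lt_of_le hb (List.rel_of_pairwise_cons h1 hb3)
    · rw [if_neg (by simpa using hb)]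
      have hyx : pvKeyC y ≤ pvKeyC x := not_lt.mp hb
      obtain ⟨ih1, ih2⟩ := ih (List.pairwise_cons.mp h1).2 (List.pairwise_cons.mp hQ).2
        (fun a ha => hx a (by simp [ha]))
      constructor
      · refine List.pairwise_cons.mpr ⟨?_, ih1⟩
        intro b hb2
        rcases (PySem.List.mem_insertBy _ _ _ _).mp hb2 with rfl | hmem
        · exact hyx
        · exact List.rel_of_pairwise_cons h1 hmem
      · refine List.pairwise_cons.mpr ⟨?_, ih2⟩
        intro b hb2
        rcases (PySem.List.mem_insertBy _ _ _ _).mp hb2 with rfl | hmem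
        · rcases lt_or_eq_of_le hyx with hlt | heq2
          · left
            exact hlt
          · right
            exact ⟨heq2, hx y (by simp)⟩
        · exact List.rel_of_pairwise_cons hQ hmem

lemma pvSorted_stable (l : List (List String))
    (h : l.Pairwise (fun a b => pvKeyF a ≤ pvKeyF b)) :
    (PySem.List.sorted l pvKeyC false).Pairwise
      (fun a b => pvKeyC a < pvKeyC b ∨ (pvKeyC a = pvKeyC b ∧ pvKeyF a ≤ pvKeyF b)) := by
  rw [PySem.List.sorted_eq_foldl_insertBy]
  suffices H : ∀ (l : List (List String)) (acc : List (List String)),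
      acc.Pairwise (fun a b => pvKeyC a ≤ pvKeyC b) →
      acc.Pairwise (fun a b => pvKeyC a < pvKeyC b ∨ (pvKeyC a = pvKeyC b ∧ pvKeyF a ≤ pvKeyF b)) →
      (∀ a ∈ acc, ∀ z ∈ l, pvKeyF a ≤ pvKeyF z) →
      l.Pairwise (fun a b => pvKeyF a ≤ pvKeyF b) →
      (l.foldl (fun acc x => PySem.List.insertBy (fun a b => decide (pvKeyC a < pvKeyC b)) x acc)
          acc).Pairwise
        (fun a b => pvKeyC a < pvKeyC b ∨ (pvKeyC a = pvKeyC b ∧ pvKeyF a ≤ pvKeyF b)) by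
    exact H l [] (by simp) (by simp) (by simp) h
  intro l
  induction l with
  | nil => intro acc hA hB _ _; exact hB
  | cons x xs ih =>
    intro acc hA hB hcross hl
    simp only [List.foldl_cons]
    obtain ⟨hA', hB'⟩ := pvInsertBy_pairwise x acc hA hB (fun a ha => hcross a ha x (by simp))
    apply ih _ hA' hB' ?_ (List.pairwise_cons.mp hl).2
    intro a ha z hz
    rcases (PySem.List.mem_insertBy _ _ _ _).mp ha with rfl | hmem
    · exact List.rel_of_pairwise_cons hl hz
    · exact hcross a hmem z (by simp [hz])

-- ===== VERDICT (by name: the statement is the Claim_ definition above) =====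
lemma pvFlattenRevPerm (L : List (List (List String))) :
    ((L.map List.reverse).flatten).Perm L.flatten := by
  induction L with
  | nil => simp
  | cons g gs ih => simpa using List.Perm.append (List.reverse_perm g) ih

theorem filterminworks_spec : Claim_equal_filterminworks := by
  intro m n hdom hpre
  unfold Spec_filterminworks filterminworks filterminworks_alt
  set s := PySem.List.sorted m pvKeyC false with hs
  have hp : s.Pairwise (fun a b => pvKeyC a ≤ pvKeyC b) := by
    rw [hs]; exact PySem.List.sorted_pairwise m pvKeyC
  obtain ⟨hA, q, hq⟩ := pvAloop s n hp s.length le_rfl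
  rw [List.take_length] at hA hq
  rcases hsp : (s.filter (fun r => decide (pvKeyC r ≠ ""))).foldl (pvStepS n) ([], [], [])
    with ⟨cur, bo, se⟩
  rw [hsp] at hA hq
  dsimp only
  rw [hA]
  dsimp only
  -- rewrite A's trailing flush into pvFlush n (cur, bo, se)
  have hflush :
      ((if (cur.length : Int) ≠ 0 ∧ n ≤ (cur.length : Int) then
          List.foldl (fun acc rw => acc ++ [PySem.List.pyGetD s ((s.length : Int) - 1 - rw) []])
            bo (PySem.List.pyRange 0 (cur.length : Int) 1)
        else bo),
       (if (cur.length : Int) ≠ 0 ∧ n ≤ (cur.length : Int) then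
          se ++ [(pvNm cur, (cur.length : Int))] else se)) = pvFlush n (cur, bo, se) := by
    rcases eq_or_ne cur [] with rfl | hcur
    · simp [pvFlush]
    · by_cases hq2 : n ≤ (cur.length : Int)
      · have hlen0 : (cur.length : Int) ≠ 0 := by
          simpa using (fun h => hcur (List.length_eq_zero_iff.mp h))
        have hread := pvReadBack q cur [] bo
        rw [List.append_nil] at hread
        have hlen : q.length + cur.length = s.length := by
          have := congrArg List.length hq
          simpa using this.symm
        rw [show (((q.length + cur.length : Nat)) : Int) = ((s.length : Nat) : Int) from by
              rw [hlen],
            ← hq] at hread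
        rw [if_pos ⟨hlen0, hq2⟩, if_pos ⟨hlen0, hq2⟩, hread]
        unfold pvFlush
        rw [if_pos ⟨hcur, hq2⟩]
        simp [pvNm, hcur]
      · rw [if_neg (fun h => hq2 h.2), if_neg (fun h => hq2 h.2)]
        unfold pvFlush
        rw [if_neg (fun h => hq2 h.2)]
  have hfl1 := congrArg Prod.fst hflush
  have hfl2 := congrArg Prod.snd hflush
  dsimp only at hfl1 hfl2
  rw [hfl1, hfl2, ← hsp]
  have htp : (s.filter (fun r => decide (pvKeyC r ≠ ""))).Pairwise
      (fun a b => pvKeyC a ≤ pvKeyC b) :=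
    List.Pairwise.sublist List.filter_sublist hp
  rw [pvSpec_runs n _ [] [] htp]
  dsimp only
  simp only [List.nil_append]
  -- B side: the dict of counts is the Counter of the composer keys
  rw [pvCounts_eq s, pvItems_runs _ htp]
  have hselB : List.filter (fun p => decide (n ≤ p.2))
      ((pvRuns (s.filter (fun r => decide (pvKeyC r ≠ "")))).map
        (fun g => (pvKeyC (g.headD []), (g.length : Int)))) =
      (pvGq n (s.filter (fun r => decide (pvKeyC r ≠ "")))).map
        (fun g => (pvKeyC (g.headD []), (g.length : Int))) := by
    rw [List.filter_map]
    rfl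
  rw [hselB]
  simp only [PySem.Dict.getD_counter]
  have hsplit : s.filter (fun r =>
        decide (pvKeyC r ≠ "" ∧
          n ≤ (((s.filter (fun r => decide (pvKeyC r ≠ ""))).map pvKeyC).count (pvKeyC r) : Int))) =
      (s.filter (fun r => decide (pvKeyC r ≠ ""))).filter (fun r =>
        decide (n ≤ ((((s.filter (fun r => decide (pvKeyC r ≠ ""))).map pvKeyC).count (pvKeyC r) : Nat) : Int))) := by
    rw [List.filter_filter]
    apply List.filter_congr
    intro x hx
    by_cases h1 : pvKeyC x ≠ "" <;>
      by_cases h2 : n ≤ ((((s.filter (fun r => decide (pvKeyC r ≠ ""))).map pvKeyC).count (pvKeyC x) : Nat) : Int) <;>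
      simp [h1, h2]
  rw [hsplit, pvFilterBody_runs n _ htp]
  -- selections now coincide; the bodies are permutations sorted by the same keys
  refine congrArg₂ Prod.mk rfl ?_
  have hQA := pvSorted_stable
    (PySem.List.sorted ((pvGq n (s.filter (fun r => decide (pvKeyC r ≠ "")))).map List.reverse).flatten pvKeyF false)
    (PySem.List.sorted_pairwise _ pvKeyF)
  have hQB := pvSorted_stable
    (PySem.List.sorted (pvGq n (s.filter (fun r => decide (pvKeyC r ≠ "")))).flatten pvKeyF false)
    (PySem.List.sorted_pairwise _ pvKeyF)
  have hmemA : ∀ a, a ∈ ((pvGq n (s.filter (fun r => decide (pvKeyC r ≠ "")))).map List.reverse).flatten →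
      a ∈ s.filter (fun r => decide (pvKeyC r ≠ "")) := by
    intro a ha
    obtain ⟨gr, hgr, hagr⟩ := List.mem_flatten.mp ha
    obtain ⟨g, hg, rfl⟩ := List.mem_map.mp hgr
    have hgrun : g ∈ pvRuns (s.filter (fun r => decide (pvKeyC r ≠ ""))) := (List.mem_filter.mp hg).1
    rw [← pvRuns_flatten (s.filter (fun r => decide (pvKeyC r ≠ "")))]
    exact List.mem_flatten.mpr ⟨g, hgrun, List.mem_reverse.mp hagr⟩
  have hmemB : ∀ a, a ∈ (pvGq n (s.filter (fun r => decide (pvKeyC r ≠ "")))).flatten →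
      a ∈ s.filter (fun r => decide (pvKeyC r ≠ "")) := by
    intro a ha
    obtain ⟨g, hg, hag⟩ := List.mem_flatten.mp ha
    have hgrun : g ∈ pvRuns (s.filter (fun r => decide (pvKeyC r ≠ ""))) := (List.mem_filter.mp hg).1
    rw [← pvRuns_flatten (s.filter (fun r => decide (pvKeyC r ≠ "")))]
    exact List.mem_flatten.mpr ⟨g, hgrun, hag⟩
  have hsym : Symmetric (fun (r r' : List String) =>
      ¬(r.getD 1 "" ≠ "" ∧ r'.getD 1 "" ≠ "" ∧ r.getD 0 "" = r'.getD 0 "" ∧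
        r.getD 1 "" = r'.getD 1 "" ∧ r ≠ r')) := by
    intro x y hxy hyx
    exact hxy ⟨hyx.2.1, hyx.1, hyx.2.2.1.symm, hyx.2.2.2.1.symm, hyx.2.2.2.2.symm⟩
  have hsPair : s.Pairwise (fun (r r' : List String) =>
      ¬(r.getD 1 "" ≠ "" ∧ r'.getD 1 "" ≠ "" ∧ r.getD 0 "" = r'.getD 0 "" ∧
        r.getD 1 "" = r'.getD 1 "" ∧ r ≠ r')) := by
    rw [hs]
    exact ((PySem.List.sorted_perm m pvKeyC false).pairwise_iff (fun h => hsym h)).mpr hpre.2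
  apply List.Perm.eq_of_pairwise
    (le := fun a b => pvKeyC a < pvKeyC b ∨ (pvKeyC a = pvKeyC b ∧ pvKeyF a ≤ pvKeyF b))
  · intro a b ha hb hab hba
    by_cases hne : a = b
    · exact hne
    exfalso
    have hat := hmemA a ((PySem.List.mem_sorted _ _ _ _).mp
      ((PySem.List.mem_sorted _ _ _ _).mp ha))
    have hbt := hmemB b ((PySem.List.mem_sorted _ _ _ _).mp
      ((PySem.List.mem_sorted _ _ _ _).mp hb))
    have hka : pvKeyC a ≠ "" := by simpa using (List.mem_filter.mp hat).2
    have hkb : pvKeyC b ≠ "" := by simpa using (List.mem_filter.mp hbt).2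
    have has : a ∈ s := List.filter_sublist.subset hat
    have hbs : b ∈ s := List.filter_sublist.subset hbt
    have hnd := List.Pairwise.forall hsym hsPair has hbs hne
    rcases hab with h1 | ⟨h1, h2⟩ <;> rcases hba with h3 | ⟨h3, h4⟩
    · exact absurd h3 (lt_asymm h1)
    · exact absurd (h3 ▸ h1) (lt_irrefl _)
    · exact absurd (h1 ▸ h3) (lt_irrefl _)
    · exact hnd ⟨hka, hkb, le_antisymm h2 h4, h1, hne⟩
  · exact hQA
  · exact hQB
  · exact ((PySem.List.sorted_perm _ _ _).trans (PySem.List.sorted_perm _ _ _)).trans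
      ((pvFlattenRevPerm _).trans
        ((PySem.List.sorted_perm _ _ _).trans (PySem.List.sorted_perm _ _ _)).symm)
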